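-- pv_equiv track=rewrite | github.com/wkf2000/LennyVerse | backend/src/backend_api/generate_service.py | _answer_text_to_letter
-- ===== SOURCE A (Python) =====
-- def _answer_text_to_letter(answer: str, options: list[dict[str, str]]) -> str:
--     a = (answer or "").strip()
--     if not a:
--         return options[0]["label"] if options else "A"
--     if len(a) == 1 and a.upper() in "ABCDEFGH":
--         return a.upper()
--     a_lower = a.lower()
--     for opt in options:
--         if opt["text"].strip().lower() == a_lower:
--             return opt["label"]
--     for opt in options:
--         ot = opt["text"].strip().lower()
--         if a_lower in ot or ot in a_lower:
--             return opt["label"]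
--     return options[0]["label"] if options else "A"
-- ===== SOURCE B (Python) =====
-- def _answer_text_to_letter(answer: str, options: list[dict[str, str]]) -> str:
--     a = (answer or "").strip()
--     if not a:
--         return options[0]["label"] if options else "A"
--     if len(a) == 1 and a.upper() in "ABCDEFGH":
--         return a.upper()
--     al = a.lower()
--
--     def rank(opt):
--         t = opt["text"].strip().lower()
--         if t == al:
--             return 0
--         if al in t or t in al:
--             return 1
--         return 2
--
--     ranks = [rank(opt) for opt in options]
--     best = min(ranks, default=2)
--     if best < 2:
--         return options[ranks.index(best)]["label"]
--     return options[0]["label"] if options else "A"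
-- ===== Notes on version B (the rewrite author's own statement) =====
-- stated objective: alternative
-- what changed: A's two sequential scans (exact-match pass, then substring pass) are replaced by a rank-minimisation: each option is scored 0/1/2 (exact/substring/none) in one mapping pass, then the label of the first option achieving the minimal rank is returned (default if the minimum is 2).
-- outside the precondition, e.g. on _answer_text_to_letter('x', [{'text': 'x', 'label': 'A'}, {'label': 'B'}]): A returns 'A', B raises KeyError
import Mathlib
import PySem

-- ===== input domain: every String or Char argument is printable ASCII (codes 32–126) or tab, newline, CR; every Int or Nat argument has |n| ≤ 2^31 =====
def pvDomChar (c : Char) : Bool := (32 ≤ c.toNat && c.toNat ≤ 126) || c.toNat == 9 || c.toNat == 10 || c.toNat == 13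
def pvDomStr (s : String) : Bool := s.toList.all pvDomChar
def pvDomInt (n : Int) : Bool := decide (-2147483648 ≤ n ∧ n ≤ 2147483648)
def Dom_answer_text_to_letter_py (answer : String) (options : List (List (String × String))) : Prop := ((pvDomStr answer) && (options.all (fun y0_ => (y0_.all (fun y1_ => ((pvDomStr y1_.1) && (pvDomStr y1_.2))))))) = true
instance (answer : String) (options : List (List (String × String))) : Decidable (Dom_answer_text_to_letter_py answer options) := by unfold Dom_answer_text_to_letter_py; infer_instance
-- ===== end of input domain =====

-- B replaces A's two sequential scans (exact pass, then substring pass) by a rank-minimisation: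
-- score every option 0/1/2 (exact/substring/none) in one mapping pass, then return the label of
-- the first option achieving the minimal rank (alternative decomposition, same cost).

-- ===== PORT A =====

-- opt[k] in total form; Pre_ guarantees the key is present (where it is not, Python raises KeyError)
def pvGet (opt : List (String × String)) (k : String) : String :=
  (PySem.Dict.mk opt).getD k ""

-- options[0]["label"] if options else "A"
def pvDefault (options : List (List (String × String))) : String :=
  match options with
  | [] => "A"
  | o :: _ => pvGet o "label"

-- A's first loop: first option whose normalized text equals a_lower
def pvScanExact (aLower : String) : List (List (String × String)) → Option String
  | [] => none
  | opt :: rest =>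
      if PySem.Str.lower (PySem.Str.strip (pvGet opt "text")) = aLower then some (pvGet opt "label")
      else pvScanExact aLower rest

-- A's second loop: first option with a substring relation to a_lower
def pvScanSub (aLower : String) : List (List (String × String)) → Option String
  | [] => none
  | opt :: rest =>
      if PySem.Str.isIn aLower (PySem.Str.lower (PySem.Str.strip (pvGet opt "text")))
         || PySem.Str.isIn (PySem.Str.lower (PySem.Str.strip (pvGet opt "text"))) aLower
      then some (pvGet opt "label")
      else pvScanSub aLower rest

def answer_text_to_letter_py (answer : String) (options : List (List (String × String))) : String :=
  let a := PySem.Str.strip answer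
  if a = "" then pvDefault options
  else if PySem.Str.len a = 1 && PySem.Str.isIn (PySem.Str.upper a) "ABCDEFGH" then PySem.Str.upper a
  else
    match pvScanExact (PySem.Str.lower a) options with
    | some l => l
    | none =>
        match pvScanSub (PySem.Str.lower a) options with
        | some l => l
        | none => pvDefault options

-- ===== PORT B =====

-- B's own dict access and default (same Python expressions as in Source B)
def pvGetB (opt : List (String × String)) (k : String) : String :=
  (PySem.Dict.mk opt).getD k ""

def pvDefaultB (options : List (List (String × String))) : String :=
  match options with
  | [] => "A"
  | o :: _ => pvGetB o "label"

-- opt["text"].strip().lower()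
def pvNorm (opt : List (String × String)) : String :=
  PySem.Str.lower (PySem.Str.strip (pvGetB opt "text"))

-- Source B's rank(opt): 0 exact, 1 substring relation, 2 no match
def pvRank (aL : String) (opt : List (String × String)) : Nat :=
  if pvNorm opt = aL then 0
  else if PySem.Str.isIn aL (pvNorm opt) || PySem.Str.isIn (pvNorm opt) aL then 1
  else 2

-- Source B's tail: ranks = [rank(opt) …]; best = min(ranks, default=2) (ported as foldl min 2);
-- if best < 2: options[ranks.index(best)]["label"] else default ("" branches are unreachable:
-- best < 2 implies best ∈ ranks and the index is in range)
def pvPick (aL d : String) (opts : List (List (String × String))) : String :=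
  let ranks := opts.map (pvRank aL)
  let best := ranks.foldl min 2
  if best < 2 then
    match PySem.List.index? ranks best with
    | some i =>
        match PySem.List.pyGet? opts (i : Int) with
        | some o => pvGetB o "label"
        | none => ""
    | none => ""
  else d

def answer_text_to_letter_py_alt (answer : String) (options : List (List (String × String))) : String :=
  let a := PySem.Str.strip answer
  if a = "" then pvDefaultB options
  else if PySem.Str.len a = 1 && PySem.Str.isIn (PySem.Str.upper a) "ABCDEFGH" then PySem.Str.upper a
  else pvPick (PySem.Str.lower a) (pvDefaultB options) options

-- ===== PRECONDITION & SPEC =====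
-- whether opt's normalized text matches the normalized answer exactly or by substring (the only
-- options whose "label" either program reads, besides options[0])
def pvMatches (aLower : String) (opt : List (String × String)) : Prop :=
  PySem.Str.lower (PySem.Str.strip (pvGet opt "text")) = aLower
  ∨ PySem.Str.isIn aLower (PySem.Str.lower (PySem.Str.strip (pvGet opt "text"))) = true
  ∨ PySem.Str.isIn (PySem.Str.lower (PySem.Str.strip (pvGet opt "text"))) aLower = true

def pvHasLabel (opt : List (String × String)) : Prop := (PySem.Dict.mk opt).contains "label" = true

-- Pre_ requires the dict keys the programs read to be present (A raises KeyError otherwise):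
-- "label" of options[0] when the stripped answer is empty; in the general branch "text" of every
-- option, "label" of every matching option, and "label" of options[0] when nothing matches.
-- Slightly narrower than A's exact crash set (A stops reading keys at its first exact match);
-- see the cite in claim.json.
def Pre_answer_text_to_letter_py (answer : String) (options : List (List (String × String))) : Prop :=
  if PySem.Str.strip answer = "" then
    (∀ o ∈ options.take 1, pvHasLabel o)
  else if PySem.Str.len (PySem.Str.strip answer) = 1
          && PySem.Str.isIn (PySem.Str.upper (PySem.Str.strip answer)) "ABCDEFGH" then
    True
  else
    (∀ opt ∈ options, (PySem.Dict.mk opt).contains "text" = true)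
    ∧ (∀ opt ∈ options, pvMatches (PySem.Str.lower (PySem.Str.strip answer)) opt → pvHasLabel opt)
    ∧ ((∀ opt ∈ options, ¬ pvMatches (PySem.Str.lower (PySem.Str.strip answer)) opt) →
         (∀ o ∈ options.take 1, pvHasLabel o))
instance (answer : String) (options : List (List (String × String))) : Decidable (Pre_answer_text_to_letter_py answer options) := by unfold Pre_answer_text_to_letter_py pvMatches pvHasLabel; infer_instance

def pvWitness_answer_text_to_letter_py : String × (List (List (String × String))) :=
  ("first one", [[("text", "first one"), ("label", "A")], [("text", "second"), ("label", "B")]])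

def Spec_answer_text_to_letter_py (answer : String) (options : List (List (String × String))) (out : String) : Prop := out = answer_text_to_letter_py_alt answer options
instance (answer : String) (options : List (List (String × String))) (out : String) : Decidable (Spec_answer_text_to_letter_py answer options out) := by unfold Spec_answer_text_to_letter_py; infer_instance

-- ===== CLAIM (what is proved, stated in full; the proofs are below) =====
def Claim_equal_answer_text_to_letter_py : Prop := ∀ (answer : String) (options : List (List (String × String))), Dom_answer_text_to_letter_py answer options → Pre_answer_text_to_letter_py answer options → Spec_answer_text_to_letter_py answer options (answer_text_to_letter_py answer options)

-- ===== LEMMAS AND PROOFS =====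

theorem pvGetB_eq_pvGet (opt : List (String × String)) (k : String) : pvGetB opt k = pvGet opt k := rfl

theorem pvDefaultB_eq (options : List (List (String × String))) : pvDefaultB options = pvDefault options := by
  cases options <;> rfl

-- folded min over an extra min
theorem pv_foldl_min_min (l : List ℕ) : ∀ a b : ℕ, l.foldl min (min a b) = min a (l.foldl min b) := by
  induction l with
  | nil => intro a b; rfl
  | cons x t ih =>
    intro a b
    simp only [List.foldl_cons]
    rw [show min (min a b) x = min a (min b x) by omega, ih]

theorem pv_fmin_cons (x : ℕ) (l : List ℕ) : (x :: l).foldl min 2 = min x (l.foldl min 2) := by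
  simp only [List.foldl_cons]
  rw [min_comm, pv_foldl_min_min]

theorem pv_foldl_min_le (l : List ℕ) : ∀ a : ℕ, l.foldl min a ≤ a := by
  induction l with
  | nil => intro a; simp
  | cons x t ih =>
    intro a
    simp only [List.foldl_cons]
    exact le_trans (ih _) (by omega)

theorem pv_foldl_min_le_mem {x : ℕ} {l : List ℕ} (hx : x ∈ l) : ∀ a : ℕ, l.foldl min a ≤ x := by
  induction l with
  | nil => cases hx
  | cons y t ih =>
    intro a
    rcases List.mem_cons.mp hx with h | h
    · subst h
      simp only [List.foldl_cons]
      exact le_trans (pv_foldl_min_le _ _) (by omega)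
    · simpa using ih h _

theorem pv_fmin_mem {l : List ℕ} (h : l.foldl min 2 < 2) : l.foldl min 2 ∈ l := by
  induction l with
  | nil => simp at h
  | cons x t ih =>
    rw [pv_fmin_cons] at h ⊢
    by_cases hle : x ≤ t.foldl min 2
    · rw [min_eq_left hle]; exact List.mem_cons_self
    · rw [min_eq_right (by omega)] at h ⊢
      exact List.mem_cons_of_mem _ (ih h)

theorem pvRank_le_two (aL : String) (o : List (String × String)) : pvRank aL o ≤ 2 := by
  unfold pvRank; split_ifs <;> omega

theorem pvRank_eq_zero_iff (aL : String) (o : List (String × String)) :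
    pvRank aL o = 0 ↔ PySem.Str.lower (PySem.Str.strip (pvGet o "text")) = aL := by
  unfold pvRank
  rw [show pvNorm o = PySem.Str.lower (PySem.Str.strip (pvGet o "text")) from rfl]
  split_ifs with h1 h2 <;> simp [h1]

-- the substring-scan condition holds iff the rank is 0 or 1 (an exact match is a substring of itself)
theorem pvSubCond_iff (aL : String) (o : List (String × String)) :
    (PySem.Str.isIn aL (PySem.Str.lower (PySem.Str.strip (pvGet o "text")))
      || PySem.Str.isIn (PySem.Str.lower (PySem.Str.strip (pvGet o "text"))) aL) = true
    ↔ pvRank aL o ≤ 1 := by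
  unfold pvRank
  rw [show pvNorm o = PySem.Str.lower (PySem.Str.strip (pvGet o "text")) from rfl]
  split_ifs with h1 h2
  · constructor
    · intro _; omega
    · intro _
      rw [h1]
      simp [PySem.Chars.isIn_iff_infix]
  · constructor
    · intro _; omega
    · intro _; simpa using h2
  · constructor
    · intro h; exact absurd h (by simp_all)
    · omega

theorem pvScanExact_eq_none_iff (aL : String) (opts : List (List (String × String))) :
    pvScanExact aL opts = none ↔ ∀ o ∈ opts, pvRank aL o ≠ 0 := by
  induction opts with
  | nil => simp [pvScanExact]
  | cons o t ih =>
    by_cases h : PySem.Str.lower (PySem.Str.strip (pvGet o "text")) = aL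
    · simp [pvScanExact, h, pvRank_eq_zero_iff]
    · simp [pvScanExact, h, ih, pvRank_eq_zero_iff]

theorem pvScanSub_eq_none_iff (aL : String) (opts : List (List (String × String))) :
    pvScanSub aL opts = none ↔ ∀ o ∈ opts, pvRank aL o = 2 := by
  induction opts with
  | nil => simp [pvScanSub]
  | cons o t ih =>
    by_cases h : (PySem.Str.isIn aL (PySem.Str.lower (PySem.Str.strip (pvGet o "text")))
        || PySem.Str.isIn (PySem.Str.lower (PySem.Str.strip (pvGet o "text"))) aL) = true
    · have := (pvSubCond_iff aL o).mp h
      simp only [pvScanSub, h, if_true]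
      constructor
      · intro hc; cases hc
      · intro hc
        have := hc o List.mem_cons_self
        omega
    · have h2 : pvRank aL o = 2 := by
        have := pvRank_le_two aL o
        have hn : ¬ pvRank aL o ≤ 1 := fun hle => h ((pvSubCond_iff aL o).mpr hle)
        omega
      have h' : ¬(PySem.Chars.isIn aL.toList (PySem.Chars.lower (PySem.Chars.strip (pvGet o "text").toList)) = true
          ∨ PySem.Chars.isIn (PySem.Chars.lower (PySem.Chars.strip (pvGet o "text").toList)) aL.toList = true) := by
        simpa using h
      simp [pvScanSub, h', ih, h2]

-- B's rank-minimisation equals A's two scans followed by the default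
set_option maxHeartbeats 1000000 in
theorem pvPick_eq (aL d : String) (opts : List (List (String × String))) :
    pvPick aL d opts =
      match pvScanExact aL opts with
      | some l => l
      | none =>
          match pvScanSub aL opts with
          | some l => l
          | none => d := by
  induction opts with
  | nil => simp [pvPick, pvScanExact, pvScanSub]
  | cons opt rest ih =>
    by_cases hx : PySem.Str.lower (PySem.Str.strip (pvGet opt "text")) = aL
    · -- exact match: rank 0, best 0, index 0
      have hr0 : pvRank aL opt = 0 := (pvRank_eq_zero_iff aL opt).mpr hx
      simp only [pvPick, List.map_cons, pv_fmin_cons, hr0, Nat.zero_min,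
        if_pos (by omega : (0:ℕ) < 2), PySem.List.index?_cons_self]
      simp [pvScanExact, hx, pvGetB_eq_pvGet]
    · have hr_ne : pvRank aL opt ≠ 0 := fun h => hx ((pvRank_eq_zero_iff aL opt).mp h)
      set m := (rest.map (pvRank aL)).foldl min 2 with hm
      by_cases hs : (PySem.Str.isIn aL (PySem.Str.lower (PySem.Str.strip (pvGet opt "text")))
          || PySem.Str.isIn (PySem.Str.lower (PySem.Str.strip (pvGet opt "text"))) aL) = true
      · -- substring match: rank 1
        have hr1 : pvRank aL opt = 1 := by
          have := (pvSubCond_iff aL opt).mp hs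
          omega
        have hspos : PySem.Chars.isIn aL.toList (PySem.Chars.lower (PySem.Chars.strip (pvGet opt "text").toList)) = true
            ∨ PySem.Chars.isIn (PySem.Chars.lower (PySem.Chars.strip (pvGet opt "text").toList)) aL.toList = true := by
          simpa using hs
        by_cases hm0 : m = 0
        · -- an exact match exists later: B steps to the rest, A's first scan hits in the rest
          have h0mem : (0 : ℕ) ∈ rest.map (pvRank aL) := by
            have := pv_fmin_mem (l := rest.map (pvRank aL)) (by omega)
            rwa [← hm, hm0] at this
          have hex : pvScanExact aL rest ≠ none := by
            rw [Ne, pvScanExact_eq_none_iff]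
            intro hall
            rcases List.mem_map.mp h0mem with ⟨o, ho, hr⟩
            exact hall o ho hr
          rcases Option.ne_none_iff_exists'.mp hex with ⟨l, hl⟩
          -- B on the cons: best = 0, index = 1 + index in rest
          have hsome := (PySem.List.index?_isSome_iff (rest.map (pvRank aL)) 0).mpr h0mem
          rcases Option.isSome_iff_exists.mp hsome with ⟨k, hk⟩
          have hpick : pvPick aL d (opt :: rest) = pvPick aL d rest := by
            simp only [pvPick, List.map_cons, pv_fmin_cons, ← hm, hr1, hm0, Nat.min_zero]
            rw [PySem.List.index?_cons_of_ne _ (by omega : (1:ℕ) ≠ 0), hk]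
            simp only [Option.map_some, if_pos (by omega : (0:ℕ) < 2)]
            rw [show ((k + 1 : ℕ) : Int) = ((k : ℕ) : Int) + 1 by push_cast; ring,
              PySem.List.pyGet?_cons_succ]
          rw [hpick, ih]
          simp [pvScanExact, hx, hl]
        · -- no exact match anywhere: B returns this label, A's second scan hits here
          have hnone : pvScanExact aL rest = none := by
            rw [pvScanExact_eq_none_iff]
            intro o ho h0
            have : (0 : ℕ) ∈ rest.map (pvRank aL) := List.mem_map.mpr ⟨o, ho, h0⟩
            have := pv_foldl_min_le_mem this 2
            omega
          have hbest : min 1 m = 1 := by omega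
          simp only [pvPick, List.map_cons, pv_fmin_cons, ← hm, hr1, hbest,
            if_pos (by omega : (1:ℕ) < 2), PySem.List.index?_cons_self]
          simp [pvScanExact, pvScanSub, hx, hspos, hnone, pvGetB_eq_pvGet]
      · -- no match: rank 2, B and A both step to the rest
        have hr2 : pvRank aL opt = 2 := by
          have := pvRank_le_two aL opt
          have hn : ¬ pvRank aL opt ≤ 1 := fun hle => hs ((pvSubCond_iff aL opt).mpr hle)
          omega
        have hsneg : ¬(PySem.Chars.isIn aL.toList (PySem.Chars.lower (PySem.Chars.strip (pvGet opt "text").toList)) = true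
            ∨ PySem.Chars.isIn (PySem.Chars.lower (PySem.Chars.strip (pvGet opt "text").toList)) aL.toList = true) := by
          simpa using hs
        have hmle : m ≤ 2 := pv_foldl_min_le _ _
        have hbest : min 2 m = m := by omega
        by_cases hm2 : m < 2
        · have hsome := (PySem.List.index?_isSome_iff (rest.map (pvRank aL)) m).mpr
            (by rw [hm]; exact pv_fmin_mem hm2)
          rcases Option.isSome_iff_exists.mp hsome with ⟨k, hk⟩
          have hpick : pvPick aL d (opt :: rest) = pvPick aL d rest := by
            simp only [pvPick, List.map_cons, pv_fmin_cons, ← hm, hr2, hbest]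
            rw [PySem.List.index?_cons_of_ne _ (by omega : (2:ℕ) ≠ m), hk]
            simp only [Option.map_some, if_pos hm2]
            rw [show ((k + 1 : ℕ) : Int) = ((k : ℕ) : Int) + 1 by push_cast; ring,
              PySem.List.pyGet?_cons_succ]
          rw [hpick, ih]
          simp [pvScanExact, pvScanSub, hx, hsneg]
        · have hm2' : m = 2 := by omega
          have hall : ∀ o ∈ rest, pvRank aL o = 2 := by
            intro o ho
            have : pvRank aL o ∈ rest.map (pvRank aL) := List.mem_map.mpr ⟨o, ho, rfl⟩
            have := pv_foldl_min_le_mem this 2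
            have := pvRank_le_two aL o
            omega
          have he : pvScanExact aL rest = none := (pvScanExact_eq_none_iff aL rest).mpr
            (fun o ho => by have := hall o ho; omega)
          have hsn : pvScanSub aL rest = none := (pvScanSub_eq_none_iff aL rest).mpr hall
          simp [pvPick, ← hm, hr2, hm2', pvScanExact, pvScanSub, hx, hsneg,
            he, hsn]

-- ===== VERDICT (by name: the statement is the Claim_ definition above) =====
theorem answer_text_to_letter_py_spec : Claim_equal_answer_text_to_letter_py := by
  intro answer options _ _
  unfold Spec_answer_text_to_letter_py
  simp only [answer_text_to_letter_py, answer_text_to_letter_py_alt, pvDefaultB_eq]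
  split_ifs with h1 h2
  · rfl
  · rfl
  · rw [pvPick_eq]
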